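-- pv_equiv track=rewrite | github.com/xuan139/ai-publisher-local-studio | api/app/main.py | compose_project_source_book
-- ===== SOURCE A (Python) =====
-- def compose_project_source_book(chapters: list[tuple[str, str]]) -> str:
--     blocks: list[str] = []
--     for index, (title, body) in enumerate(chapters):
--         if index:
--             blocks.append("")
--         blocks.append(title.strip())
--         blocks.append(body.strip())
--     return "\n\n".join(blocks).strip() + "\n"
-- ===== SOURCE B (Python) =====
-- def compose_project_source_book(chapters: list[tuple[str, str]]) -> str:
--     def rec(ch: list[tuple[str, str]]) -> str:
--         if not ch:
--             return ""
--         title, body = ch[0]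
--         rest = ch[1:]
--         block = title.strip() + "\n\n" + body.strip()
--         return block + "\n\n\n\n" + rec(rest) if rest else block
--     return rec(chapters).strip() + "\n"
-- ===== Notes on version B (the rewrite author's own statement) =====
-- stated objective: alternative
-- what changed: B is recursive with direct string concatenation: no enumerate, no blocks list and no join -- each chapter's stripped title/body are concatenated and chapters are glued by '\n\n\n\n' in the recursion.
import Mathlib
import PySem

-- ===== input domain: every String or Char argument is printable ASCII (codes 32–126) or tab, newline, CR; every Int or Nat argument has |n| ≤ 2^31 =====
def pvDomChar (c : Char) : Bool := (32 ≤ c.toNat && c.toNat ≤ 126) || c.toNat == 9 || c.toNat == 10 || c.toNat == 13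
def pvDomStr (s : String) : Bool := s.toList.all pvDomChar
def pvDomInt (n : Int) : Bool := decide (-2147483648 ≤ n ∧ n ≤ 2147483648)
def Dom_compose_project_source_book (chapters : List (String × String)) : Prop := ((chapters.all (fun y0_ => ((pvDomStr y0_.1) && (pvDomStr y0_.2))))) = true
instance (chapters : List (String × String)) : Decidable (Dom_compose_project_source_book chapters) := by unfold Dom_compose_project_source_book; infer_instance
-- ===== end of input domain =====

-- B replaces A's enumerate/index-branch/sentinel-"" list and join by structural recursion with
-- direct string concatenation (a different decomposition, same result).

-- ===== PORT A =====
def compose_project_source_book (chapters : List (String × String)) : String :=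
  PySem.Str.strip (PySem.Str.join "\n\n"
    ((PySem.List.enumerate chapters 0).foldl
      (fun bl p =>
        (if p.1 ≠ 0 then bl ++ [""] else bl) ++ [PySem.Str.strip p.2.1, PySem.Str.strip p.2.2])
      [])) ++ "\n"

-- ===== PORT B =====
-- the inner recursive helper 'rec' of Source B
def cpsbRec : List (String × String) → String
  | [] => ""
  | (title, body) :: rest =>
      let block := PySem.Str.strip title ++ "\n\n" ++ PySem.Str.strip body
      match rest with
      | [] => block
      | _ :: _ => block ++ "\n\n\n\n" ++ cpsbRec rest

def compose_project_source_book_alt (chapters : List (String × String)) : String :=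
  PySem.Str.strip (cpsbRec chapters) ++ "\n"

-- ===== PRECONDITION & SPEC =====
def Spec_compose_project_source_book (chapters : List (String × String)) (out : String) : Prop := out = compose_project_source_book_alt chapters
instance (chapters : List (String × String)) (out : String) : Decidable (Spec_compose_project_source_book chapters out) := by unfold Spec_compose_project_source_book; infer_instance

-- ===== CLAIM (what is proved, stated in full; the proofs are below) =====
def Claim_equal_compose_project_source_book : Prop := ∀ (chapters : List (String × String)), Dom_compose_project_source_book chapters → Spec_compose_project_source_book chapters (compose_project_source_book chapters)

-- ===== LEMMAS AND PROOFS =====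

-- A's foldl over enumerate, once past index 0, appends ["", t.strip, b.strip] per chapter.
theorem foldl_enum_blocks (l : List (String × String)) (s : Int) (hs : 1 ≤ s) (acc : List String) :
    (PySem.List.enumerate l s).foldl
      (fun bl p =>
        (if p.1 ≠ 0 then bl ++ [""] else bl) ++ [PySem.Str.strip p.2.1, PySem.Str.strip p.2.2])
      acc
    = acc ++ l.flatMap (fun c => ["", PySem.Str.strip c.1, PySem.Str.strip c.2]) := by
  induction l generalizing s acc with
  | nil => simp [PySem.List.enumerate_nil]
  | cons c r ih =>
      have hne : s ≠ 0 := by omega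
      rw [PySem.List.enumerate_cons, List.foldl_cons, ih (s+1) (by omega)]
      simp [hne]

-- B's recursion, on the list side, is the "\n\n"-join of A's sentinel-interleaved block list.
theorem cpsbRec_toList (c : String × String) (l : List (String × String)) :
    (cpsbRec (c :: l)).toList
    = PySem.Chars.join ['\n','\n']
        (PySem.Chars.strip c.1.toList :: PySem.Chars.strip c.2.toList ::
          l.flatMap (fun d => [[], PySem.Chars.strip d.1.toList, PySem.Chars.strip d.2.toList])) := by
  induction l generalizing c with
  | nil =>
      simp [cpsbRec, PySem.Chars.join, List.intercalate, PySem.Str.toList_strip]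
  | cons d r ih =>
      have h := ih d
      simp only [cpsbRec] at h ⊢
      rw [List.flatMap_cons]
      simp only [List.cons_append, List.nil_append]
      rw [PySem.Chars.join_cons_cons, PySem.Chars.join_cons_cons, PySem.Chars.join_cons_cons]
      simp only [String.toList_append, h, PySem.Chars.join_cons_cons]
      simp [PySem.Str.toList_strip]

-- ===== VERDICT (by name: the statement is the Claim_ definition above) =====
theorem compose_project_source_book_spec : Claim_equal_compose_project_source_book := by
  intro chapters _
  show compose_project_source_book chapters = compose_project_source_book_alt chapters
  cases chapters with
  | nil => rfl
  | cons c rest =>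
      unfold compose_project_source_book compose_project_source_book_alt
      have hblocks :
          (PySem.Str.join "\n\n"
            ((PySem.List.enumerate (c :: rest) 0).foldl
              (fun bl p =>
                (if p.1 ≠ 0 then bl ++ [""] else bl) ++ [PySem.Str.strip p.2.1, PySem.Str.strip p.2.2])
              [])).toList
          = (cpsbRec (c :: rest)).toList := by
        rw [PySem.List.enumerate_cons, List.foldl_cons, foldl_enum_blocks rest (0+1) (by omega)]
        rw [cpsbRec_toList]
        simp [PySem.Str.toList_join, List.map_flatMap, PySem.Str.toList_strip]
      have := String.toList_inj.mp hblocks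
      rw [this]
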